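-- pv_equiv track=rewrite | github.com/NJ-Thomson/Oslo | prepare_modeller_from_pdb.py | find_internal_gaps
-- ===== SOURCE A (Python) =====
-- def find_internal_gaps(residue_dict):
--     """Find internal gaps in a residue dictionary."""
--     if not residue_dict:
--         return [], None, None
--
--     residues = sorted(residue_dict.keys())
--     first_res = min(residues)
--     last_res = max(residues)
--
--     gaps = []
--     in_gap = False
--     gap_start = None
--
--     for i in range(first_res, last_res + 1):
--         if i not in residue_dict:
--             if not in_gap:
--                 gap_start = i
--                 in_gap = True
--         else:
--             if in_gap:
--                 gaps.append((gap_start, i - 1))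
--                 in_gap = False
--
--     return gaps, first_res, last_res
-- ===== SOURCE B (Python) =====
-- def find_internal_gaps(residue_dict):
--     """Find internal gaps in a residue dictionary."""
--     if not residue_dict:
--         return [], None, None
--     ks = sorted(residue_dict)
--     gaps = [(a + 1, b - 1) for a, b in zip(ks, ks[1:]) if b - a > 1]
--     return gaps, ks[0], ks[-1]
-- ===== Notes on version B (the rewrite author's own statement) =====
-- stated objective: faster
-- what changed: Instead of scanning every integer from min to max and testing dict membership with an in_gap state machine, B sorts the keys once and emits a gap for each consecutive pair of keys whose difference exceeds 1.
import Mathlib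
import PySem

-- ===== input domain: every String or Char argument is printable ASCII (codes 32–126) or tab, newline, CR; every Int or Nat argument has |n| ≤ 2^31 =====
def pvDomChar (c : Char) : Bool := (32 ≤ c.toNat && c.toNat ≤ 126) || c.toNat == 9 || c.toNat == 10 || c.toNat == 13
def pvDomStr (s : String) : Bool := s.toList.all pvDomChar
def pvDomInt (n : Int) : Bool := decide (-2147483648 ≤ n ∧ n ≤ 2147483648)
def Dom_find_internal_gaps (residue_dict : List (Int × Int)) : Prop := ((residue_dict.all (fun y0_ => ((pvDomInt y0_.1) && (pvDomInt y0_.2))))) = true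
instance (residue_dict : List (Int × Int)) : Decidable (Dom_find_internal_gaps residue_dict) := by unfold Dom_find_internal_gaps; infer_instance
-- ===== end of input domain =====

-- B replaces A's min..max integer scan with a single pass over consecutive sorted keys (objective: faster).

-- ===== PORT A =====
-- loop body of A's `for i in range(first_res, last_res + 1)`; state = (gaps, in_gap, gap_start)
def pvStepA (d : List (Int × Int)) (st : List (Int × Int) × Bool × Option Int) (i : Int) :
    List (Int × Int) × Bool × Option Int :=
  if (d.map Prod.fst).contains i = false then      -- `if i not in residue_dict`
    if st.2.1 = false then (st.1, true, some i)    -- gap_start = i; in_gap = True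
    else st
  else
    if st.2.1 = true then (st.1 ++ [(st.2.2.getD 0, i - 1)], false, st.2.2)
      -- gaps.append((gap_start, i-1)); in_gap = False.  gap_start is always `some` here,
      -- so `.getD 0` only makes the read total; it never supplies the default.
    else st

def find_internal_gaps (residue_dict : List (Int × Int)) : (List (Int × Int)) × Option Int × Option Int :=
  if residue_dict = [] then ([], none, none)
  else
    let residues := PySem.List.sorted (residue_dict.map Prod.fst) id
    match PySem.List.min? residues id, PySem.List.max? residues id with
    | some first_res, some last_res =>
        let st := (PySem.List.pyRange first_res (last_res + 1)).foldl (pvStepA residue_dict) ([], false, none)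
        (st.1, some first_res, some last_res)
    | _, _ => ([], none, none)   -- unreachable: residues is nonempty (totality guard only)

-- ===== PORT B =====
def find_internal_gaps_alt (residue_dict : List (Int × Int)) : (List (Int × Int)) × Option Int × Option Int :=
  if residue_dict = [] then ([], none, none)
  else
    let ks := PySem.List.sorted (residue_dict.map Prod.fst) id
    let gaps := (ks.zip (PySem.List.slice ks (some 1) none)).filterMap
      (fun p => if 1 < p.2 - p.1 then some (p.1 + 1, p.2 - 1) else none)
    (gaps, PySem.List.pyGet? ks 0, PySem.List.pyGet? ks (-1))
    -- ks ≠ [] under the guard, so ks[0] / ks[-1] are the `some` values Python returns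

-- ===== PRECONDITION & SPEC =====
def Spec_find_internal_gaps (residue_dict : List (Int × Int)) (out : (List (Int × Int)) × Option Int × Option Int) : Prop := out = find_internal_gaps_alt residue_dict
instance (residue_dict : List (Int × Int)) (out : (List (Int × Int)) × Option Int × Option Int) : Decidable (Spec_find_internal_gaps residue_dict out) := by unfold Spec_find_internal_gaps; infer_instance

-- ===== CLAIM (what is proved, stated in full; the proofs are below) =====
def Claim_equal_find_internal_gaps : Prop := ∀ (residue_dict : List (Int × Int)), Dom_find_internal_gaps residue_dict → Spec_find_internal_gaps residue_dict (find_internal_gaps residue_dict)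

-- ===== LEMMAS AND PROOFS =====

-- the gaps between consecutive elements of a sorted key list
def pvGaps : List Int → List (Int × Int)
  | a :: b :: t => (if 1 < b - a then [(a + 1, b - 1)] else []) ++ pvGaps (b :: t)
  | _ => []

lemma pvGaps_eq_zip : ∀ ks : List Int,
    (ks.zip (List.drop 1 ks)).filterMap
      (fun p => if 1 < p.2 - p.1 then some (p.1 + 1, p.2 - 1) else none) = pvGaps ks := by
  intro ks
  match ks with
  | [] => rfl
  | [a] => rfl
  | a :: b :: t =>
      have ih := pvGaps_eq_zip (b :: t)
      simp only [List.drop_succ_cons, List.drop_zero, List.zip_cons_cons, List.filterMap_cons] at *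
      split_ifs with h <;> simp [pvGaps, h, ih]

lemma pvFoldl_some {α β : Type} (f : Option α → β → Option α)
    (h : ∀ a x, (f (some a) x).isSome) : ∀ (t : List β) (o : α), (t.foldl f (some o)).isSome := by
  intro t
  induction t with
  | nil => simp
  | cons x t ih =>
      intro o
      obtain ⟨a, ha⟩ := Option.isSome_iff_exists.mp (h o x)
      simp only [List.foldl_cons, ha]
      exact ih a

lemma pvMin_cons_isSome (t : List Int) (x : Int) : (PySem.List.min? (x :: t) id).isSome := by
  simp only [PySem.List.min?, List.foldl_cons]
  exact pvFoldl_some _ (by intro a y; simp only; split <;> simp) t x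

lemma pvMax_cons_isSome (t : List Int) (x : Int) : (PySem.List.max? (x :: t) id).isSome := by
  simp only [PySem.List.max?, List.foldl_cons]
  exact pvFoldl_some _ (by intro a y; simp only; split <;> simp) t x

lemma pvLe_getLast : ∀ (l : List Int) (m : Int), l.Pairwise (· ≤ ·) → m ∈ l →
    ∀ (hne : l ≠ []), m ≤ l.getLast hne := by
  intro l
  induction l with
  | nil => simp
  | cons x t ih =>
      intro m hpw hm hne
      rcases List.mem_cons.mp hm with rfl | h
      · cases t with
        | nil => simp
        | cons y s =>
            rw [List.getLast_cons (by simp)]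
            exact (List.pairwise_cons.mp hpw).1 _ (List.getLast_mem _)
      · have ht : t ≠ [] := List.ne_nil_of_mem h
        rw [List.getLast_cons ht]
        exact ih m hpw.of_cons h ht

lemma pvMin_sorted (x : Int) (t : List Int) (hpw : List.Pairwise (· ≤ ·) (x :: t)) :
    PySem.List.min? (x :: t) id = some x := by
  obtain ⟨m, hm⟩ := Option.isSome_iff_exists.mp (pvMin_cons_isSome t x)
  have hmem := PySem.List.min?_mem hm
  have hle : m ≤ x := PySem.List.min?_isMin hm x (by simp)
  have hge : x ≤ m := by
    rcases List.mem_cons.mp hmem with h | h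
    · omega
    · exact (List.pairwise_cons.mp hpw).1 m h
  rw [hm, le_antisymm hle hge]

lemma pvMax_sorted (x : Int) (t : List Int) (hpw : List.Pairwise (· ≤ ·) (x :: t)) :
    PySem.List.max? (x :: t) id = some ((x :: t).getLast (by simp)) := by
  obtain ⟨m, hm⟩ := Option.isSome_iff_exists.mp (pvMax_cons_isSome t x)
  have h1 : (x :: t).getLast (by simp) ≤ m :=
    PySem.List.max?_isMax hm _ (List.getLast_mem _)
  have h2 : m ≤ (x :: t).getLast (by simp) :=
    pvLe_getLast _ m hpw (PySem.List.max?_mem hm) (by simp)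
  rw [hm, le_antisymm h2 h1]

lemma pvGet_zero (x : Int) (t : List Int) : PySem.List.pyGet? (x :: t) 0 = some x := by
  simp [PySem.List.pyGet?, PySem.List.pyIdx?]

lemma pvGet_neg_one (l : List Int) (hne : l ≠ []) :
    PySem.List.pyGet? l (-1) = some (l.getLast hne) := by
  have h0 : 0 < l.length := List.length_pos_iff.mpr hne
  simp only [PySem.List.pyGet?, PySem.List.pyIdx?]
  rw [if_neg (by omega), if_pos (by omega)]
  simp [List.getLast_eq_getElem]

-- a run of non-members with in_gap already true leaves the state unchanged
lemma pvRun_nonmem (d : List (Int × Int)) :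
    ∀ (l : List Int) (g : List (Int × Int)) (gs : Option Int),
      (∀ i ∈ l, (d.map Prod.fst).contains i = false) →
      l.foldl (pvStepA d) (g, true, gs) = (g, true, gs) := by
  intro l
  induction l with
  | nil => intro g gs _; rfl
  | cons x t ih =>
      intro g gs h
      have hx := h x (by simp)
      simp only [List.foldl_cons, pvStepA, hx]
      exact ih g gs (fun i hi => h i (by simp [hi]))

-- one inter-key segment of A's scan: from key a (exclusive) to the next key b (inclusive)
lemma pvSegment (d : List (Int × Int)) (a b : Int) (t : List Int) (g : List (Int × Int))
    (gs : Option Int) (hab : a ≤ b)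
    (hmem : ∀ i : Int, a < i → ((d.map Prod.fst).contains i = true ↔ i ∈ b :: t))
    (hbt : ∀ x ∈ t, b ≤ x) :
    (PySem.List.pyRange (a + 1) (b + 1)).foldl (pvStepA d) (g, false, gs) =
      (g ++ (if 1 < b - a then [(a + 1, b - 1)] else []),
       false, if 1 < b - a then some (a + 1) else gs) := by
  by_cases h0 : b = a
  · subst h0
    rw [PySem.List.pyRange_one_eq_nil le_rfl]
    simp
  by_cases h1 : b = a + 1
  · subst h1
    rw [PySem.List.pyRange_one_cons (by omega), PySem.List.pyRange_one_eq_nil le_rfl]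
    have hc : (d.map Prod.fst).contains (a + 1) = true := (hmem (a + 1) (by omega)).mpr (by simp)
    simp only [List.foldl_cons, List.foldl_nil, pvStepA]
    rw [hc]
    simp
  · -- a + 1 < b : a real gap
    have hlt : a + 1 < b := by omega
    have hnot : ∀ i : Int, a < i → i < b → (d.map Prod.fst).contains i = false := by
      intro i hai hib
      rcases hc : (d.map Prod.fst).contains i with _ | _
      · rfl
      · exfalso
        rcases List.mem_cons.mp ((hmem i hai).mp hc) with rfl | h
        · omega
        · have := hbt i h; omega
    have e3 : PySem.List.pyRange b (b + 1) = [b] := by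
      rw [PySem.List.pyRange_one_cons (by omega), PySem.List.pyRange_one_eq_nil le_rfl]
    have e2 : PySem.List.pyRange (a + 2) (b + 1) = PySem.List.pyRange (a + 2) b ++ [b] := by
      rw [PySem.List.pyRange_one_append (a + 2) b (b + 1) (by omega) (by omega), e3]
    have e1 : PySem.List.pyRange (a + 1) (b + 1) =
        (a + 1) :: (PySem.List.pyRange (a + 2) b ++ [b]) := by
      rw [PySem.List.pyRange_one_cons (by omega), show a + 1 + 1 = a + 2 by ring, e2]
    rw [e1]
    simp only [List.foldl_cons, List.foldl_append]
    rw [show pvStepA d (g, false, gs) (a + 1) = (g, true, some (a + 1)) by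
          simp only [pvStepA]; rw [hnot (a + 1) (by omega) (by omega)]; simp]
    rw [pvRun_nonmem d _ g (some (a + 1)) (by
          intro i hi
          have := PySem.List.mem_pyRange_one.mp hi
          exact hnot i (by omega) (by omega))]
    have hcb : (d.map Prod.fst).contains b = true := (hmem b (by omega)).mpr (by simp)
    simp only [pvStepA]
    rw [hcb]
    simp
    exact ⟨by omega, fun h => absurd h (by omega)⟩

-- main loop invariant: after the head key a, folding A's scan up to the last key
-- accumulates exactly the consecutive-pair gaps
lemma pvLoop (d : List (Int × Int)) :
    ∀ (rest : List Int) (a : Int) (g : List (Int × Int)) (gs : Option Int),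
      List.Pairwise (· ≤ ·) (a :: rest) →
      (∀ i : Int, a < i → ((d.map Prod.fst).contains i = true ↔ i ∈ rest)) →
      ∃ gs', (PySem.List.pyRange (a + 1) ((a :: rest).getLast (by simp) + 1)).foldl
          (pvStepA d) (g, false, gs) = (g ++ pvGaps (a :: rest), false, gs') := by
  intro rest
  induction rest with
  | nil =>
      intro a g gs _ _
      refine ⟨gs, ?_⟩
      rw [List.getLast_singleton, PySem.List.pyRange_one_eq_nil le_rfl]
      simp [pvGaps]
  | cons b t ih =>
      intro a g gs hpw hmem
      have hab : a ≤ b := (List.pairwise_cons.mp hpw).1 b (by simp)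
      have hpw' : List.Pairwise (· ≤ ·) (b :: t) := hpw.of_cons
      have hbt : ∀ x ∈ t, b ≤ x := (List.pairwise_cons.mp hpw').1
      have hbL : b ≤ (b :: t).getLast (by simp) := pvLe_getLast _ b hpw' (by simp) (by simp)
      have hsplit : PySem.List.pyRange (a + 1) ((b :: t).getLast (by simp) + 1) =
          PySem.List.pyRange (a + 1) (b + 1) ++
          PySem.List.pyRange (b + 1) ((b :: t).getLast (by simp) + 1) :=
        PySem.List.pyRange_one_append _ _ _ (by omega) (by omega)
      have hmem' : ∀ i : Int, b < i → ((d.map Prod.fst).contains i = true ↔ i ∈ t) := by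
        intro i hbi
        rw [hmem i (by omega)]
        constructor
        · intro h; rcases List.mem_cons.mp h with rfl | h
          · omega
          · exact h
        · intro h; exact List.mem_cons_of_mem _ h
      obtain ⟨gs', hgs'⟩ := ih b (g ++ (if 1 < b - a then [(a + 1, b - 1)] else []))
        (if 1 < b - a then some (a + 1) else gs) hpw' hmem'
      refine ⟨gs', ?_⟩
      rw [List.getLast_cons (by simp), hsplit, List.foldl_append,
          pvSegment d a b t g gs hab hmem hbt, hgs']
      simp [pvGaps, List.append_assoc]

-- ===== VERDICT (by name: the statement is the Claim_ definition above) =====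
theorem find_internal_gaps_spec : Claim_equal_find_internal_gaps := by
  intro d _
  unfold Spec_find_internal_gaps find_internal_gaps find_internal_gaps_alt
  by_cases hd : d = []
  · simp [hd]
  · simp only [if_neg hd]
    have hperm : (PySem.List.sorted (d.map Prod.fst) id).Perm (d.map Prod.fst) :=
      PySem.List.sorted_perm _ id false
    have hpw : List.Pairwise (· ≤ ·) (PySem.List.sorted (d.map Prod.fst) id) :=
      PySem.List.sorted_pairwise _ id
    have hne : PySem.List.sorted (d.map Prod.fst) id ≠ [] := by
      intro h
      refine hd ?_
      have hlen := hperm.length_eq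
      rw [h] at hlen
      simpa using List.map_eq_nil_iff.mp (List.length_eq_zero_iff.mp hlen.symm)
    obtain ⟨x, t, hxt⟩ := List.exists_cons_of_ne_nil hne
    rw [hxt] at hperm hpw ⊢
    have hcont : ∀ i : Int, (d.map Prod.fst).contains i = true ↔ i ∈ x :: t := by
      intro i
      rw [List.contains_iff_mem]
      exact hperm.mem_iff.symm
    rw [pvMin_sorted x t hpw, pvMax_sorted x t hpw]
    dsimp only
    have hxL : x ≤ (x :: t).getLast (by simp) := pvLe_getLast _ x hpw (by simp) (by simp)
    rw [PySem.List.pyRange_one_cons (by omega)]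
    simp only [List.foldl_cons]
    rw [show pvStepA d ([], false, none) x = ([], false, none) by
          simp only [pvStepA]; rw [(hcont x).mpr (by simp)]; simp]
    have hmem : ∀ i : Int, x < i → ((d.map Prod.fst).contains i = true ↔ i ∈ t) := by
      intro i hxi
      rw [hcont i]
      constructor
      · intro h
        rcases List.mem_cons.mp h with rfl | h
        · omega
        · exact h
      · intro h
        exact List.mem_cons_of_mem _ h
    obtain ⟨gs', hgs'⟩ := pvLoop d t x [] none hpw hmem
    rw [hgs']
    rw [show PySem.List.slice (x :: t) (some 1) none = List.drop 1 (x :: t) by simp [pysem]]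
    rw [pvGaps_eq_zip (x :: t), pvGet_zero, pvGet_neg_one (x :: t) (by simp)]
    simp
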